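-- pv_equiv track=rewrite | github.com/bilaldinc/AIhomowork2 | src/main.py | repair_solution_1
-- ===== SOURCE A (Python) =====
-- def repair_solution_1(solution, adjacency_matrix, vertex_weights):
--     # Nodes are removed greedly according to number of edges
--     # O(|V| * |V|)
--     length = len(solution)
--     number_of_connections = [0 for x in  range(length)]
--     inner_adjacency_matrix = [[0 for x in range(length)] for y in range(length)]
--     valid_solution = True
--     total_removed_vertex = 0
--     # O(|V| * |V|)
--     for i in range(length):
--         if solution[i] == 1:
--             for j in range(length):
--                 if solution[j] == 1:
--                     if adjacency_matrix[i][j] == 1: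
--                         valid_solution = False
--                         number_of_connections[i] += 1
--                         inner_adjacency_matrix[i][j] = 1
--
--     # O(|V| * |V|)
--     while not valid_solution:
--         # find max gain
--         # O(|V|)
--         max_edge = 0
--         max_edge_i = -1
--         valid_solution = True
--         for i in range(length):
--             if number_of_connections[i] > 0:
--                 valid_solution = False
--                 if number_of_connections[i] >= max_edge:
--                     max_edge = number_of_connections[i]
--                     max_edge_i = i
--
--         # remove vertex from solution etc.
--         # O(|V|)
--         if max_edge_i is not -1:
--             solution[max_edge_i] = 0
--             number_of_connections[max_edge_i] = 0
--             total_removed_vertex += 1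
--             for i in range(length):
--                 if inner_adjacency_matrix[i][max_edge_i] is not 0:
--                     inner_adjacency_matrix[i][max_edge_i] = 0
--                     number_of_connections[i] -= 1
--             for i in range(length):
--                 inner_adjacency_matrix[max_edge_i][i] = 0
--
--     return total_removed_vertex
-- ===== SOURCE B (Python) =====
-- def repair_solution_1(solution, adjacency_matrix, vertex_weights):
--     # Same greedy removal, but degrees are recomputed from the adjacency
--     # matrix each round instead of being maintained incrementally.
--     removed = 0
--     while True:
--         best = -1
--         best_deg = 0
--         for i in range(len(solution)):
--             if solution[i] == 1:
--                 d = sum(1 for j in range(len(solution))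
--                         if solution[j] == 1 and adjacency_matrix[i][j] == 1)
--                 if d > 0 and d >= best_deg:
--                     best_deg = d
--                     best = i
--         if best == -1:
--             return removed
--         solution[best] = 0
--         removed += 1
-- ===== Notes on version B (the rewrite author's own statement) =====
-- stated objective: simpler
-- what changed: B drops A's incrementally maintained connection counters and inner adjacency matrix, recomputing every still-selected vertex's degree directly from the adjacency matrix each round of the same greedy removal loop.
import Mathlib
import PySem

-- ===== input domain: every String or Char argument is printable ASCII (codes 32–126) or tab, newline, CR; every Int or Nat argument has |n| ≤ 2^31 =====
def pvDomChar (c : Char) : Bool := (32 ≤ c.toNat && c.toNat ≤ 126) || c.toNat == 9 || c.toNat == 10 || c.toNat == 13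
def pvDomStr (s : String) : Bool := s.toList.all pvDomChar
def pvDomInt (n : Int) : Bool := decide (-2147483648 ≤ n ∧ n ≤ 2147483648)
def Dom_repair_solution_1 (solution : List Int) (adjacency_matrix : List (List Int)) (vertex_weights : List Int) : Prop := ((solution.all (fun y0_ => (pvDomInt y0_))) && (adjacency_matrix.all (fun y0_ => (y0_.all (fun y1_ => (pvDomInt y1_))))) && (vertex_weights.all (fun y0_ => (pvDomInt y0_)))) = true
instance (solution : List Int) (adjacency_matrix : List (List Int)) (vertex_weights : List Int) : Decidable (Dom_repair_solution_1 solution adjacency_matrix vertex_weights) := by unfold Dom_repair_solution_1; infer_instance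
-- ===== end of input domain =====

-- B replaces A's incrementally-maintained connection counts and inner adjacency matrix
-- by recomputing each still-selected vertex's degree from the adjacency matrix every
-- round (objective: simpler — shorter code, no auxiliary matrices to allocate or maintain).
-- Both A and B mutate `solution` in place identically (zeroing removed entries);
-- the equivalence proved here is about the RETURN value.

-- ===== PORT A =====
-- Helpers shared syntactically by both ports (they are exactly the Python tests
-- `solution[i] == 1` and `adjacency_matrix[i][j] == 1`; indices produced by the
-- programs are below `len(solution)` for `solution`, and under Pre_ the adjacency
-- accesses are in range, so `getD` is exact there).
def pvSel (s : List Int) (i : Nat) : Bool := s.getD i 0 == 1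
def pvAdj (adj : List (List Int)) (i j : Nat) : Bool := (adj.getD i []).getD j 0 == 1

-- the initial double loop of A: builds (valid_solution, number_of_connections, inner_adjacency_matrix)
def pvInit (adj : List (List Int)) (n : Nat) (s : List Int) : Bool × List Int × List (List Int) :=
  (List.range n).foldl (fun st i =>
    if pvSel s i then
      (List.range n).foldl (fun st2 j =>
        if pvSel s j then
          if pvAdj adj i j then
            (false, st2.2.1.set i (st2.2.1.getD i 0 + 1), st2.2.2.set i ((st2.2.2.getD i []).set j 1))
          else st2
        else st2) st
    else st) (true, List.replicate n (0 : Int), List.replicate n (List.replicate n (0 : Int)))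

-- the max-search scan of A's while body: state (max_edge, max_edge_i, valid_solution)
def pvScanA (n : Nat) (conn : List Int) : Int × Int × Bool :=
  (List.range n).foldl (fun st i =>
    if conn.getD i 0 > 0 then
      if conn.getD i 0 ≥ st.1 then (conn.getD i 0, (i : Int), false) else (st.1, st.2.1, false)
    else st) (0, -1, true)

-- A's first removal loop: decrement counts of vertices pointing at v, clear column v
def pvRemove (n : Nat) (v : Nat) (conn : List Int) (inner : List (List Int)) : List Int × List (List Int) :=
  (List.range n).foldl (fun p i =>
    if (p.2.getD i []).getD v 0 ≠ 0 then
      (p.1.set i (p.1.getD i 0 - 1), p.2.set i ((p.2.getD i []).set v 0))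
    else p) (conn, inner)

-- A's second removal loop: clear row v
def pvZeroRow (n : Nat) (v : Nat) (inner : List (List Int)) : List (List Int) :=
  (List.range n).foldl (fun m i => m.set v ((m.getD v []).set i 0)) inner

-- A's while loop (fuel = n + 2 bounds its iteration count: each pass either exits or
-- removes one of the ≤ n selected vertices; at fuel 0 the loop returns the running
-- total, which by then is already the final value)
def pvLoopA (n : Nat) : Nat → List Int → List Int → List (List Int) → Bool → Int → Int
  | 0, _, _, _, _, total => total
  | fuel + 1, sol, conn, inner, valid, total =>
    if valid then total
    else
      let scan := pvScanA n conn
      if scan.2.1 ≠ -1 then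
        let v := scan.2.1.toNat
        let p := pvRemove n v (conn.set v 0) inner
        pvLoopA n fuel (sol.set v 0) p.1 (pvZeroRow n v p.2) scan.2.2 (total + 1)
      else pvLoopA n fuel sol conn inner scan.2.2 total

def repair_solution_1 (solution : List Int) (adjacency_matrix : List (List Int)) (vertex_weights : List Int) : Int :=
  let n := solution.length
  let init := pvInit adjacency_matrix n solution
  pvLoopA n (n + 2) solution init.2.1 init.2.2 init.1 0

-- ===== PORT B =====
-- B's per-round degree of vertex i: count of still-selected j with an edge i→j
def pvDeg (adj : List (List Int)) (n : Nat) (s : List Int) (i : Nat) : Int :=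
  (List.range n).foldl (fun acc j => if pvSel s j && pvAdj adj i j then acc + 1 else acc) 0

-- B's scan: (best_deg, best) over the still-selected vertices
def pvScanB (adj : List (List Int)) (n : Nat) (s : List Int) : Int × Int :=
  (List.range n).foldl (fun st i =>
    if pvSel s i then
      let d := pvDeg adj n s i
      if d > 0 && d ≥ st.1 then (d, (i : Int)) else st
    else st) (0, -1)

-- B's while-True loop (same fuel bound as A's)
def pvLoopB (adj : List (List Int)) : Nat → List Int → Int → Int
  | 0, _, removed => removed
  | fuel + 1, s, removed =>
    let scan := pvScanB adj s.length s
    if scan.2 == -1 then removed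
    else pvLoopB adj fuel (s.set scan.2.toNat 0) (removed + 1)

def repair_solution_1_alt (solution : List Int) (adjacency_matrix : List (List Int)) (vertex_weights : List Int) : Int :=
  pvLoopB adjacency_matrix (solution.length + 2) solution 0

-- ===== PRECONDITION & SPEC =====
-- Pre_ excludes exactly the inputs on which the Python A raises an IndexError:
-- whenever two (not necessarily distinct) indices i, j are selected (solution entry 1),
-- A reads adjacency_matrix[i][j], so row i must exist and be long enough.
def Pre_repair_solution_1 (solution : List Int) (adjacency_matrix : List (List Int)) (vertex_weights : List Int) : Prop :=
  ∀ i < solution.length, solution.getD i 0 = 1 →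
    i < adjacency_matrix.length ∧
    ∀ j < solution.length, solution.getD j 0 = 1 → j < (adjacency_matrix.getD i []).length
instance (solution : List Int) (adjacency_matrix : List (List Int)) (vertex_weights : List Int) : Decidable (Pre_repair_solution_1 solution adjacency_matrix vertex_weights) := by unfold Pre_repair_solution_1; infer_instance

def pvWitness_repair_solution_1 : List Int × List (List Int) × List Int :=
  ([1, 1, 0], [[0, 1, 0], [1, 0, 0], [0, 0, 0]], [])

def Spec_repair_solution_1 (solution : List Int) (adjacency_matrix : List (List Int)) (vertex_weights : List Int) (out : Int) : Prop := out = repair_solution_1_alt solution adjacency_matrix vertex_weights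
instance (solution : List Int) (adjacency_matrix : List (List Int)) (vertex_weights : List Int) (out : Int) : Decidable (Spec_repair_solution_1 solution adjacency_matrix vertex_weights out) := by unfold Spec_repair_solution_1; infer_instance

-- ===== CLAIM (what is proved, stated in full; the proofs are below) =====
def Claim_equal_repair_solution_1 : Prop := ∀ (solution : List Int) (adjacency_matrix : List (List Int)) (vertex_weights : List Int), Dom_repair_solution_1 solution adjacency_matrix vertex_weights → Pre_repair_solution_1 solution adjacency_matrix vertex_weights → Spec_repair_solution_1 solution adjacency_matrix vertex_weights (repair_solution_1 solution adjacency_matrix vertex_weights)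

-- ===== LEMMAS AND PROOFS =====

-- list-as-array access lemmas
theorem pvGetD_set_self {α : Type} (xs : List α) (k : Nat) (v d : α) (h : k < xs.length) :
    (xs.set k v).getD k d = v := by simp [List.getD, h]

theorem pvGetD_set_other {α : Type} (xs : List α) (k i : Nat) (v d : α) (h : k ≠ i) :
    (xs.set k v).getD i d = xs.getD i d := by simp [List.getD, List.getElem?_set_ne h]

-- degree as a countP
theorem pvDeg_eq_countP (adj : List (List Int)) (n : Nat) (s : List Int) (i : Nat) :
    pvDeg adj n s i = ((List.range n).countP (fun j => pvSel s j && pvAdj adj i j) : Int) := by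
  unfold pvDeg
  rw [PySem.List.foldl_if_add_one (fun j => pvSel s j && pvAdj adj i j) (List.range n) 0]
  ring

-- selection after zeroing one entry
theorem pvSel_set_self (s : List Int) (v : Nat) : pvSel (s.set v 0) v = false := by
  by_cases h : v < s.length
  · simp [pvSel, List.getD, List.getElem?_set_self h]
  · simp [pvSel, List.set_eq_of_length_le (Nat.le_of_not_lt h), List.getElem?_eq_none (Nat.le_of_not_lt h)]

theorem pvSel_set_other (s : List Int) (v i : Nat) (h : v ≠ i) : pvSel (s.set v 0) i = pvSel s i := by
  simp [pvSel, List.getD, List.getElem?_set_ne h]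

theorem pvCountP_range_update (p p' : Nat → Bool) (v n : Nat) (hv : v < n)
    (hne : ∀ j, j ≠ v → p' j = p j) (hpv : p' v = false) :
    (List.range n).countP p = (List.range n).countP p' + (if p v then 1 else 0) := by
  induction n with
  | zero => omega
  | succ m ih =>
    rw [List.range_succ, List.countP_append, List.countP_append]
    rcases Nat.lt_or_ge v m with h | h
    · have hm : p' m = p m := hne m (by omega)
      rw [ih h]
      simp [List.countP_cons, hm]
      omega
    · have hv' : v = m := by omega
      subst hv'
      have hcongr : (List.range v).countP p = (List.range v).countP p' := by
        apply List.countP_congr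
        intro a ha
        have : a < v := List.mem_range.mp ha
        simp [hne a (by omega)]
      rw [hcongr]
      simp [List.countP_cons, hpv]

theorem pvDeg_set (adj : List (List Int)) (n : Nat) (s : List Int) (v i : Nat) (hv : v < n) :
    pvDeg adj n s i = pvDeg adj n (s.set v 0) i + (if pvSel s v && pvAdj adj i v then 1 else 0) := by
  rw [pvDeg_eq_countP, pvDeg_eq_countP]
  have h := pvCountP_range_update (fun j => pvSel s j && pvAdj adj i j)
    (fun j => pvSel (s.set v 0) j && pvAdj adj i j) v n hv
    (fun j hj => by simp [pvSel_set_other s v j (fun he => hj he.symm)])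
    (by simp [pvSel_set_self])
  rw [h]
  push_cast
  split_ifs <;> simp

-- invariant linking A's state (conn, inner) to the current solution
def pvInv (adj : List (List Int)) (n : Nat) (s conn : List Int) (inner : List (List Int)) : Prop :=
  s.length = n ∧ conn.length = n ∧ inner.length = n ∧
  (∀ i, i < n → (inner.getD i []).length = n) ∧
  (∀ i, i < n → (pvSel s i = true → conn.getD i 0 = pvDeg adj n s i) ∧
                (pvSel s i = false → conn.getD i 0 ≤ 0)) ∧
  (∀ i j, i < n → j < n →
    (inner.getD i []).getD j 0 = (if pvSel s i && pvSel s j && pvAdj adj i j then 1 else 0))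

-- scan equality under the invariant (generalized over the scanned index list)
theorem pvScan_eq_aux (adj : List (List Int)) (n : Nat) (s conn : List Int)
    (hlen : ∀ i, i < n →
      (pvSel s i = true → conn.getD i 0 = pvDeg adj n s i) ∧
      (pvSel s i = false → conn.getD i 0 ≤ 0)) :
    ∀ (l : List Nat), (∀ i ∈ l, i < n) → ∀ (m mi : Int) (vv : Bool),
    ((l.foldl (fun st i =>
        if conn.getD i 0 > 0 then
          if conn.getD i 0 ≥ st.1 then (conn.getD i 0, (i : Int), false) else (st.1, st.2.1, false)
        else st) (m, mi, vv)).1 =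
      (l.foldl (fun st i =>
        if pvSel s i then
          let d := pvDeg adj n s i
          if d > 0 && d ≥ st.1 then (d, (i : Int)) else st
        else st) (m, mi)).1) ∧
    ((l.foldl (fun st i =>
        if conn.getD i 0 > 0 then
          if conn.getD i 0 ≥ st.1 then (conn.getD i 0, (i : Int), false) else (st.1, st.2.1, false)
        else st) (m, mi, vv)).2.1 =
      (l.foldl (fun st i =>
        if pvSel s i then
          let d := pvDeg adj n s i
          if d > 0 && d ≥ st.1 then (d, (i : Int)) else st
        else st) (m, mi)).2) := by
  intro l
  induction l with
  | nil => intro _ m mi vv; exact ⟨rfl, rfl⟩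
  | cons a t ih =>
    intro hmem m mi vv
    have ha : a < n := hmem a (by simp)
    have hmem' : ∀ i ∈ t, i < n := fun i hi => hmem i (by simp [hi])
    simp only [List.foldl_cons]
    cases hsel : pvSel s a with
    | true =>
      have hc : conn.getD a 0 = pvDeg adj n s a := (hlen a ha).1 hsel
      by_cases hd : pvDeg adj n s a > 0
      · by_cases hge : pvDeg adj n s a ≥ m
        · rw [if_pos (by omega), if_pos (by rw [hc]; omega)]
          simp only [hsel, if_pos, hc]
          rw [if_pos (by simp; omega)]
          exact ih hmem' _ _ _
        · rw [if_pos (by omega), if_neg (by rw [hc]; omega)]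
          simp only [hsel, if_pos]
          rw [if_neg (by simp; omega)]
          exact ih hmem' _ _ _
      · rw [if_neg (by omega)]
        simp only [hsel, if_pos]
        rw [if_neg (by simp; omega)]
        exact ih hmem' _ _ _
    | false =>
      have hc : conn.getD a 0 ≤ 0 := (hlen a ha).2 hsel
      rw [if_neg (by omega), if_neg (by simp [hsel])]
      exact ih hmem' _ _ _

theorem pvScan_eq (adj : List (List Int)) (n : Nat) (s conn : List Int) (inner : List (List Int))
    (hinv : pvInv adj n s conn inner) :
    (pvScanA n conn).1 = (pvScanB adj n s).1 ∧ (pvScanA n conn).2.1 = (pvScanB adj n s).2 := by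
  obtain ⟨_, _, _, _, h5, _⟩ := hinv
  exact pvScan_eq_aux adj n s conn h5 (List.range n) (fun i hi => List.mem_range.mp hi) 0 (-1) true

-- A's scan skips all entries when none is positive
theorem pvScanA_skip (conn : List Int) :
    ∀ (l : List Nat) (st : Int × Int × Bool), (∀ i ∈ l, conn.getD i 0 ≤ 0) →
    l.foldl (fun st i =>
      if conn.getD i 0 > 0 then
        if conn.getD i 0 ≥ st.1 then (conn.getD i 0, (i : Int), false) else (st.1, st.2.1, false)
      else st) st = st := by
  intro l
  induction l with
  | nil => intro st _; rfl
  | cons a t ih =>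
    intro st h
    simp only [List.foldl_cons]
    rw [if_neg (by have := h a (by simp); omega)]
    exact ih st (fun i hi => h i (by simp [hi]))

theorem pvScanA_id (n : Nat) (conn : List Int) (h : ∀ i, i < n → conn.getD i 0 ≤ 0) :
    pvScanA n conn = (0, -1, true) := by
  unfold pvScanA
  exact pvScanA_skip conn (List.range n) (0, -1, true) (fun i hi => h i (List.mem_range.mp hi))

-- B's scan finds nothing when every selected degree is ≤ 0
theorem pvScanB_skip (adj : List (List Int)) (n : Nat) (s : List Int) :
    ∀ (l : List Nat) (st : Int × Int),
    (∀ i ∈ l, pvSel s i = true → pvDeg adj n s i ≤ 0) →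
    l.foldl (fun st i =>
      if pvSel s i then
        let d := pvDeg adj n s i
        if d > 0 && d ≥ st.1 then (d, (i : Int)) else st
      else st) st = st := by
  intro l
  induction l with
  | nil => intro st _; rfl
  | cons a t ih =>
    intro st h
    simp only [List.foldl_cons]
    have hstep : (if pvSel s a then
        let d := pvDeg adj n s a
        if d > 0 && d ≥ st.1 then (d, (a : Int)) else st
      else st) = st := by
      cases hsel : pvSel s a with
      | true =>
        have := h a (by simp) hsel
        simp only [if_pos]
        rw [if_neg (by simp; omega)]
      | false => rw [if_neg (by simp [hsel])]
    rw [hstep]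
    exact ih st (fun i hi => h i (by simp [hi]))

theorem pvScanB_id (adj : List (List Int)) (n : Nat) (s : List Int)
    (h : ∀ i, i < n → pvSel s i = true → pvDeg adj n s i ≤ 0) :
    pvScanB adj n s = (0, -1) := by
  unfold pvScanB
  exact pvScanB_skip adj n s (List.range n) (0, -1) (fun i hi => h i (List.mem_range.mp hi))

-- once A's scan has cleared valid it stays cleared
theorem pvScanA_false_stays (conn : List Int) :
    ∀ (l : List Nat) (st : Int × Int × Bool), st.2.2 = false →
    (l.foldl (fun st i =>
      if conn.getD i 0 > 0 then
        if conn.getD i 0 ≥ st.1 then (conn.getD i 0, (i : Int), false) else (st.1, st.2.1, false)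
      else st) st).2.2 = false := by
  intro l
  induction l with
  | nil => intro st h; exact h
  | cons a t ih =>
    intro st h
    simp only [List.foldl_cons]
    by_cases hc : conn.getD a 0 > 0
    · rw [if_pos hc]
      by_cases hg : conn.getD a 0 ≥ st.1
      · rw [if_pos hg]; exact ih _ rfl
      · rw [if_neg hg]; exact ih _ rfl
    · rw [if_neg hc]; exact ih st h

-- if A's scan reports valid, it changed nothing
theorem pvScanA_valid_aux (conn : List Int) :
    ∀ (l : List Nat) (st : Int × Int × Bool),
    (l.foldl (fun st i =>
      if conn.getD i 0 > 0 then
        if conn.getD i 0 ≥ st.1 then (conn.getD i 0, (i : Int), false) else (st.1, st.2.1, false)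
      else st) st).2.2 = true →
    (l.foldl (fun st i =>
      if conn.getD i 0 > 0 then
        if conn.getD i 0 ≥ st.1 then (conn.getD i 0, (i : Int), false) else (st.1, st.2.1, false)
      else st) st) = st := by
  intro l
  induction l with
  | nil => intro st _; rfl
  | cons a t ih =>
    intro st h
    simp only [List.foldl_cons] at h ⊢
    by_cases hc : conn.getD a 0 > 0
    · exfalso
      rw [if_pos hc] at h
      by_cases hg : conn.getD a 0 ≥ st.1
      · rw [if_pos hg] at h; rw [pvScanA_false_stays conn t _ rfl] at h; exact Bool.false_ne_true h
      · rw [if_neg hg] at h; rw [pvScanA_false_stays conn t _ rfl] at h; exact Bool.false_ne_true h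
    · rw [if_neg hc] at h ⊢; exact ih st h

theorem pvScanA_valid (n : Nat) (conn : List Int) (h : (pvScanA n conn).2.2 = true) :
    pvScanA n conn = (0, -1, true) := by
  exact pvScanA_valid_aux conn (List.range n) (0, -1, true) h

-- A's running maximum never decreases
theorem pvScanA_mono (n : Nat) (conn : List Int) :
    ∀ (l : List Nat) (st : Int × Int × Bool),
    st.1 ≤ (l.foldl (fun st i =>
      if conn.getD i 0 > 0 then
        if conn.getD i 0 ≥ st.1 then (conn.getD i 0, (i : Int), false) else (st.1, st.2.1, false)
      else st) st).1 := by
  intro l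
  induction l with
  | nil => intro st; exact le_refl _
  | cons a t ih =>
    intro st
    simp only [List.foldl_cons]
    by_cases hc : conn.getD a 0 > 0
    · by_cases hg : conn.getD a 0 ≥ st.1
      · rw [if_pos hc, if_pos hg]
        have := ih (conn.getD a 0, (a : Int), false)
        simp only at this
        omega
      · rw [if_pos hc, if_neg hg]
        have := ih (st.1, st.2.1, false)
        simp only at this
        omega
    · rw [if_neg hc]; exact ih st

-- provenance of A's scan result
theorem pvScanA_aux_pos (n : Nat) (conn : List Int) :
    ∀ (l : List Nat), (∀ i ∈ l, i < n) → ∀ (st : Int × Int × Bool),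
    0 ≤ st.1 → (0 < st.1 → ∃ i, i < n ∧ st.2.1 = (i : Int) ∧ 0 < conn.getD i 0) →
    (0 ≤ (l.foldl (fun st i =>
        if conn.getD i 0 > 0 then
          if conn.getD i 0 ≥ st.1 then (conn.getD i 0, (i : Int), false) else (st.1, st.2.1, false)
        else st) st).1) ∧
    (0 < (l.foldl (fun st i =>
        if conn.getD i 0 > 0 then
          if conn.getD i 0 ≥ st.1 then (conn.getD i 0, (i : Int), false) else (st.1, st.2.1, false)
        else st) st).1 →
      ∃ i, i < n ∧ (l.foldl (fun st i =>
        if conn.getD i 0 > 0 then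
          if conn.getD i 0 ≥ st.1 then (conn.getD i 0, (i : Int), false) else (st.1, st.2.1, false)
        else st) st).2.1 = (i : Int) ∧ 0 < conn.getD i 0) ∧
    ((∃ i ∈ l, 0 < conn.getD i 0) →
      0 < (l.foldl (fun st i =>
        if conn.getD i 0 > 0 then
          if conn.getD i 0 ≥ st.1 then (conn.getD i 0, (i : Int), false) else (st.1, st.2.1, false)
        else st) st).1) := by
  intro l
  induction l with
  | nil =>
    intro _ st h1 h2
    exact ⟨h1, h2, by rintro ⟨i, hi, _⟩; exact absurd hi (List.not_mem_nil)⟩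
  | cons a t ih =>
    intro hmem st h1 h2
    have ha : a < n := hmem a (by simp)
    have hmem' : ∀ i ∈ t, i < n := fun i hi => hmem i (by simp [hi])
    simp only [List.foldl_cons]
    by_cases hc : conn.getD a 0 > 0
    · by_cases hg : conn.getD a 0 ≥ st.1
      · rw [if_pos hc, if_pos hg]
        have hrec := ih hmem' (conn.getD a 0, (a : Int), false) (by omega)
          (fun _ => ⟨a, ha, rfl, hc⟩)
        refine ⟨hrec.1, hrec.2.1, fun _ => ?_⟩
        -- st.1 grows monotonically; here new st.1 = conn a > 0
        have := pvScanA_mono n conn t (conn.getD a 0, (a : Int), false)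
        omega
      · rw [if_pos hc, if_neg hg]
        have hrec := ih hmem' (st.1, st.2.1, false) h1 h2
        refine ⟨hrec.1, hrec.2.1, fun _ => ?_⟩
        have := pvScanA_mono n conn t (st.1, st.2.1, false)
        simp only at this
        omega
    · rw [if_neg hc]
      have hrec := ih hmem' st h1 h2
      refine ⟨hrec.1, hrec.2.1, ?_⟩
      rintro ⟨i, hi, hpos⟩
      rcases List.mem_cons.mp hi with he | ht
      · exact absurd hpos (by rw [he]; omega)
      · exact hrec.2.2 ⟨i, ht, hpos⟩

theorem pvScanA_none (n : Nat) (conn : List Int) (h : (pvScanA n conn).2.1 = -1) :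
    ∀ i, i < n → conn.getD i 0 ≤ 0 := by
  intro i hi
  by_contra hpos
  have haux := pvScanA_aux_pos n conn (List.range n) (fun j hj => List.mem_range.mp hj)
    (0, -1, true) (le_refl 0) (by intro h0; omega)
  have hlt : 0 < (pvScanA n conn).1 :=
    haux.2.2 ⟨i, List.mem_range.mpr hi, by omega⟩
  obtain ⟨k, _, hk, _⟩ := haux.2.1 hlt
  rw [pvScanA] at h
  rw [h] at hk
  omega

theorem pvScanA_some (n : Nat) (conn : List Int) (h : (pvScanA n conn).2.1 ≠ -1) :
    ∃ i, i < n ∧ (pvScanA n conn).2.1 = (i : Int) ∧ conn.getD i 0 > 0 := by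
  have haux := pvScanA_aux_pos n conn (List.range n) (fun j hj => List.mem_range.mp hj)
    (0, -1, true) (le_refl 0) (by intro h0; omega)
  by_cases hpos : ∃ i, i < n ∧ 0 < conn.getD i 0
  · obtain ⟨i, hi, hci⟩ := hpos
    have hlt : 0 < (pvScanA n conn).1 := haux.2.2 ⟨i, List.mem_range.mpr hi, hci⟩
    exact haux.2.1 hlt
  · exfalso
    apply h
    have hall : ∀ i, i < n → conn.getD i 0 ≤ 0 := by
      intro i hi; by_contra hc; exact hpos ⟨i, hi, by omega⟩
    rw [pvScanA_id n conn hall]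

-- characterization of pvRemove, by induction on the processed prefix
theorem pvRemove_aux (n v : Nat) (conn : List Int) (inner : List (List Int))
    (hv : v < n) (hc : conn.length = n) (hi : inner.length = n)
    (hrow : ∀ i, i < n → (inner.getD i []).length = n) :
    ∀ (k : Nat), k ≤ n →
    ((List.range k).foldl (fun p i =>
        if (p.2.getD i []).getD v 0 ≠ 0 then
          (p.1.set i (p.1.getD i 0 - 1), p.2.set i ((p.2.getD i []).set v 0))
        else p) (conn, inner)).1.length = n ∧
    ((List.range k).foldl (fun p i =>
        if (p.2.getD i []).getD v 0 ≠ 0 then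
          (p.1.set i (p.1.getD i 0 - 1), p.2.set i ((p.2.getD i []).set v 0))
        else p) (conn, inner)).2.length = n ∧
    (∀ i, i < n →
      ((List.range k).foldl (fun p i =>
        if (p.2.getD i []).getD v 0 ≠ 0 then
          (p.1.set i (p.1.getD i 0 - 1), p.2.set i ((p.2.getD i []).set v 0))
        else p) (conn, inner)).1.getD i 0 =
        (if i < k ∧ (inner.getD i []).getD v 0 ≠ 0 then conn.getD i 0 - 1 else conn.getD i 0)) ∧
    (∀ i, i < n →
      ((List.range k).foldl (fun p i =>
        if (p.2.getD i []).getD v 0 ≠ 0 then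
          (p.1.set i (p.1.getD i 0 - 1), p.2.set i ((p.2.getD i []).set v 0))
        else p) (conn, inner)).2.getD i [] =
        (if i < k ∧ (inner.getD i []).getD v 0 ≠ 0 then (inner.getD i []).set v 0
         else inner.getD i [])) := by
  intro k
  induction k with
  | zero => intro _; exact ⟨hc, hi, fun i _ => by simp, fun i _ => by simp⟩
  | succ m ih =>
    intro hm
    obtain ⟨ih1, ih2, ih3, ih4⟩ := ih (by omega)
    rw [List.range_succ, List.foldl_append, List.foldl_cons, List.foldl_nil]
    set r := ((List.range m).foldl (fun p i =>
        if (p.2.getD i []).getD v 0 ≠ 0 then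
          (p.1.set i (p.1.getD i 0 - 1), p.2.set i ((p.2.getD i []).set v 0))
        else p) (conn, inner)) with hr
    have hrm : r.2.getD m [] = inner.getD m [] := by
      rw [ih4 m (by omega)]; simp
    by_cases hcond : (inner.getD m []).getD v 0 ≠ 0
    · rw [if_pos (by rw [hrm]; exact hcond)]
      refine ⟨by simp [ih1], by simp [ih2], ?_, ?_⟩
      · intro i hi'
        by_cases he : i = m
        · subst he
          rw [pvGetD_set_self _ _ _ _ (by omega), ih3 i (by omega),
            if_neg (by rintro ⟨h1, _⟩; omega), if_pos ⟨by omega, hcond⟩]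
        · rw [pvGetD_set_other _ m i _ _ (fun he' => he he'.symm), ih3 i hi']
          have : (i < m + 1 ∧ (inner.getD i []).getD v 0 ≠ 0) ↔
                 (i < m ∧ (inner.getD i []).getD v 0 ≠ 0) := by
            constructor
            · rintro ⟨h1, h2⟩; exact ⟨by omega, h2⟩
            · rintro ⟨h1, h2⟩; exact ⟨by omega, h2⟩
          rw [if_congr this rfl rfl]
      · intro i hi'
        by_cases he : i = m
        · subst he
          rw [pvGetD_set_self _ _ _ _ (by omega), hrm, if_pos ⟨by omega, hcond⟩]
        · rw [pvGetD_set_other _ m i _ _ (fun he' => he he'.symm), ih4 i hi']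
          have : (i < m + 1 ∧ (inner.getD i []).getD v 0 ≠ 0) ↔
                 (i < m ∧ (inner.getD i []).getD v 0 ≠ 0) := by
            constructor
            · rintro ⟨h1, h2⟩; exact ⟨by omega, h2⟩
            · rintro ⟨h1, h2⟩; exact ⟨by omega, h2⟩
          rw [if_congr this rfl rfl]
    · rw [if_neg (by rw [hrm]; exact hcond)]
      refine ⟨ih1, ih2, ?_, ?_⟩
      · intro i hi'
        rw [ih3 i hi']
        by_cases he : i = m
        · subst he
          rw [if_neg (by rintro ⟨h1, _⟩; omega), if_neg (by rintro ⟨_, hx⟩; exact hcond hx)]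
        · have : (i < m + 1 ∧ (inner.getD i []).getD v 0 ≠ 0) ↔
                 (i < m ∧ (inner.getD i []).getD v 0 ≠ 0) := by
            constructor
            · rintro ⟨h1, h2⟩; exact ⟨by omega, h2⟩
            · rintro ⟨h1, h2⟩; exact ⟨by omega, h2⟩
          rw [if_congr this rfl rfl]
      · intro i hi'
        rw [ih4 i hi']
        by_cases he : i = m
        · subst he
          rw [if_neg (by rintro ⟨h1, _⟩; omega), if_neg (by rintro ⟨_, hx⟩; exact hcond hx)]
        · have : (i < m + 1 ∧ (inner.getD i []).getD v 0 ≠ 0) ↔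
                 (i < m ∧ (inner.getD i []).getD v 0 ≠ 0) := by
            constructor
            · rintro ⟨h1, h2⟩; exact ⟨by omega, h2⟩
            · rintro ⟨h1, h2⟩; exact ⟨by omega, h2⟩
          rw [if_congr this rfl rfl]

theorem pvRemove_spec (n v : Nat) (conn : List Int) (inner : List (List Int))
    (hv : v < n) (hc : conn.length = n) (hi : inner.length = n)
    (hrow : ∀ i, i < n → (inner.getD i []).length = n) :
    (pvRemove n v conn inner).1.length = n ∧ (pvRemove n v conn inner).2.length = n ∧
    (∀ i, i < n → ((pvRemove n v conn inner).2.getD i []).length = n) ∧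
    (∀ i, i < n → (pvRemove n v conn inner).1.getD i 0 =
        conn.getD i 0 - (if (inner.getD i []).getD v 0 ≠ 0 then 1 else 0)) ∧
    (∀ i j, i < n → j < n → ((pvRemove n v conn inner).2.getD i []).getD j 0 =
        (if j = v then 0 else (inner.getD i []).getD j 0)) := by
  obtain ⟨h1, h2, h3, h4⟩ := pvRemove_aux n v conn inner hv hc hi hrow n (le_refl n)
  refine ⟨h1, h2, ?_, ?_, ?_⟩
  · intro i hi'
    rw [pvRemove, h4 i hi']
    split_ifs with hcnd
    · rw [List.length_set]; exact hrow i hi'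
    · exact hrow i hi'
  · intro i hi'
    rw [pvRemove, h3 i hi']
    by_cases hcnd : (inner.getD i []).getD v 0 ≠ 0
    · rw [if_pos ⟨hi', hcnd⟩, if_pos hcnd]
    · rw [if_neg (by rintro ⟨_, hx⟩; exact hcnd hx), if_neg hcnd]
      omega
  · intro i j hi' hj'
    rw [pvRemove, h4 i hi']
    by_cases hcnd : (inner.getD i []).getD v 0 ≠ 0
    · rw [if_pos ⟨hi', hcnd⟩]
      by_cases hjv : j = v
      · subst hjv; rw [pvGetD_set_self _ _ _ _ (by rw [hrow i hi']; omega), if_pos rfl]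
      · rw [pvGetD_set_other _ v j _ _ (fun he => hjv he.symm), if_neg hjv]
    · rw [if_neg (by rintro ⟨_, hx⟩; exact hcnd hx)]
      by_cases hjv : j = v
      · subst hjv
        rw [if_pos rfl]
        omega
      · rw [if_neg hjv]

-- characterization of pvZeroRow, by induction on the processed prefix
theorem pvZeroRow_aux (n v : Nat) (inner : List (List Int))
    (hv : v < n) (hi : inner.length = n)
    (hrow : ∀ i, i < n → (inner.getD i []).length = n) :
    ∀ (k : Nat), k ≤ n →
    ((List.range k).foldl (fun m i => m.set v ((m.getD v []).set i 0)) inner).length = n ∧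
    (∀ i, i < n →
      (((List.range k).foldl (fun m i => m.set v ((m.getD v []).set i 0)) inner).getD i []).length = n) ∧
    (∀ i j, i < n → j < n →
      (((List.range k).foldl (fun m i => m.set v ((m.getD v []).set i 0)) inner).getD i []).getD j 0 =
        (if i = v ∧ j < k then 0 else (inner.getD i []).getD j 0)) := by
  intro k
  induction k with
  | zero =>
    intro _
    exact ⟨hi, hrow, fun i j _ _ => by simp⟩
  | succ m ih =>
    intro hm
    obtain ⟨ih1, ih2, ih3⟩ := ih (by omega)
    rw [List.range_succ, List.foldl_append, List.foldl_cons, List.foldl_nil]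
    set r := ((List.range m).foldl (fun m i => m.set v ((m.getD v []).set i 0)) inner) with hr
    refine ⟨by simp [ih1], ?_, ?_⟩
    · intro i hi'
      by_cases he : i = v
      · subst he
        rw [pvGetD_set_self _ _ _ _ (by omega), List.length_set]
        exact ih2 i hi'
      · rw [pvGetD_set_other _ v i _ _ (fun h' => he h'.symm)]
        exact ih2 i hi'
    · intro i j hi' hj'
      by_cases he : i = v
      · subst he
        rw [pvGetD_set_self _ _ _ _ (by omega)]
        by_cases hj : j = m
        · subst hj
          rw [pvGetD_set_self _ _ _ _ (by rw [ih2 i hi']; omega), if_pos ⟨rfl, by omega⟩]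
        · rw [pvGetD_set_other _ m j _ _ (fun h' => hj h'.symm), ih3 i j hi' hj']
          have : (i = i ∧ j < m + 1) ↔ (i = i ∧ j < m) := by
            constructor
            · rintro ⟨_, h2⟩; exact ⟨rfl, by omega⟩
            · rintro ⟨_, h2⟩; exact ⟨rfl, by omega⟩
          rw [if_congr this rfl rfl]
      · rw [pvGetD_set_other _ v i _ _ (fun h' => he h'.symm), ih3 i j hi' hj',
          if_congr (show (i = v ∧ j < m) ↔ (i = v ∧ j < m + 1) by
            constructor
            · rintro ⟨h1, _⟩; exact absurd h1 he
            · rintro ⟨h1, _⟩; exact absurd h1 he) rfl rfl]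

theorem pvZeroRow_spec (n v : Nat) (inner : List (List Int))
    (hv : v < n) (hi : inner.length = n)
    (hrow : ∀ i, i < n → (inner.getD i []).length = n) :
    (pvZeroRow n v inner).length = n ∧
    (∀ i, i < n → ((pvZeroRow n v inner).getD i []).length = n) ∧
    (∀ i j, i < n → j < n → ((pvZeroRow n v inner).getD i []).getD j 0 =
        (if i = v then 0 else (inner.getD i []).getD j 0)) := by
  obtain ⟨h1, h2, h3⟩ := pvZeroRow_aux n v inner hv hi hrow n (le_refl n)
  refine ⟨h1, h2, ?_⟩
  intro i j hi' hj'
  rw [pvZeroRow, h3 i j hi' hj',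
    if_congr (show (i = v ∧ j < n) ↔ (i = v) by
      constructor
      · rintro ⟨h', _⟩; exact h'
      · intro h'; exact ⟨h', hj'⟩) rfl rfl]

-- invariant preservation by a removal step
theorem pvInv_step (adj : List (List Int)) (n : Nat) (s conn : List Int) (inner : List (List Int))
    (hinv : pvInv adj n s conn inner) (v : Nat) (hv : v < n) (hsel : pvSel s v = true) :
    pvInv adj n (s.set v 0) (pvRemove n v (conn.set v 0) inner).1
      (pvZeroRow n v (pvRemove n v (conn.set v 0) inner).2) := by
  obtain ⟨hs, hc, hi, hrow, hconn, hinner⟩ := hinv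
  obtain ⟨r1, r2, r3, r4, r5⟩ :=
    pvRemove_spec n v (conn.set v 0) inner hv (by simp [hc]) hi hrow
  obtain ⟨z1, z2, z3⟩ := pvZeroRow_spec n v (pvRemove n v (conn.set v 0) inner).2 hv r2 r3
  refine ⟨by simp [hs], r1, z1, z2, ?_, ?_⟩
  · intro i hi'
    rw [r4 i hi']
    by_cases he : i = v
    · subst he
      rw [pvGetD_set_self _ _ _ _ (by omega)]
      constructor
      · intro hsel'; rw [pvSel_set_self] at hsel'; exact absurd hsel' (by simp)
      · intro _
        split_ifs <;> omega
    · rw [pvGetD_set_other _ v i _ _ (fun h' => he h'.symm), pvSel_set_other s v i (fun h' => he h'.symm)]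
      constructor
      · intro hsel'
        rw [(hconn i hi').1 hsel']
        rw [hinner i v hi' hv, hsel, hsel']
        rw [pvDeg_set adj n s v i hv, hsel]
        by_cases hadj : pvAdj adj i v = true
        · rw [hadj]; simp
        · rw [Bool.eq_false_iff.mpr hadj]; simp
      · intro hsel'
        have h0 := (hconn i hi').2 hsel'
        split_ifs <;> omega
  · intro i j hi' hj'
    rw [z3 i j hi' hj']
    by_cases he : i = v
    · subst he
      rw [if_pos rfl, pvSel_set_self]
      simp
    · rw [if_neg he, r5 i j hi' hj']
      by_cases hjv : j = v
      · subst hjv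
        rw [if_pos rfl, pvSel_set_self]
        simp
      · rw [if_neg hjv, hinner i j hi' hj',
          pvSel_set_other s v i (fun h' => he h'.symm), pvSel_set_other s v j (fun h' => hjv h'.symm)]

-- characterization of A's inner initialization loop (row i), over the processed prefix
theorem pvInitInner_aux (adj : List (List Int)) (n : Nat) (s : List Int) (i : Nat) (hi : i < n) :
    ∀ (m : Nat), m ≤ n → ∀ (st : Bool × List Int × List (List Int)),
    st.2.1.length = n → st.2.2.length = n → (∀ i', i' < n → (st.2.2.getD i' []).length = n) →
    (((List.range m).foldl (fun st2 j =>
        if pvSel s j then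
          if pvAdj adj i j then
            (false, st2.2.1.set i (st2.2.1.getD i 0 + 1), st2.2.2.set i ((st2.2.2.getD i []).set j 1))
          else st2
        else st2) st).2.1.length = n) ∧
    (((List.range m).foldl (fun st2 j =>
        if pvSel s j then
          if pvAdj adj i j then
            (false, st2.2.1.set i (st2.2.1.getD i 0 + 1), st2.2.2.set i ((st2.2.2.getD i []).set j 1))
          else st2
        else st2) st).2.2.length = n) ∧
    (∀ i', i' < n → ((((List.range m).foldl (fun st2 j =>
        if pvSel s j then
          if pvAdj adj i j then
            (false, st2.2.1.set i (st2.2.1.getD i 0 + 1), st2.2.2.set i ((st2.2.2.getD i []).set j 1))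
          else st2
        else st2) st).2.2.getD i' []).length = n)) ∧
    (((List.range m).foldl (fun st2 j =>
        if pvSel s j then
          if pvAdj adj i j then
            (false, st2.2.1.set i (st2.2.1.getD i 0 + 1), st2.2.2.set i ((st2.2.2.getD i []).set j 1))
          else st2
        else st2) st).2.1.getD i 0 =
      st.2.1.getD i 0 + ((List.range m).countP (fun j => pvSel s j && pvAdj adj i j) : Int)) ∧
    (∀ i', i' ≠ i → (((List.range m).foldl (fun st2 j =>
        if pvSel s j then
          if pvAdj adj i j then
            (false, st2.2.1.set i (st2.2.1.getD i 0 + 1), st2.2.2.set i ((st2.2.2.getD i []).set j 1))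
          else st2
        else st2) st).2.1.getD i' 0 = st.2.1.getD i' 0)) ∧
    (∀ i', i' ≠ i → (((List.range m).foldl (fun st2 j =>
        if pvSel s j then
          if pvAdj adj i j then
            (false, st2.2.1.set i (st2.2.1.getD i 0 + 1), st2.2.2.set i ((st2.2.2.getD i []).set j 1))
          else st2
        else st2) st).2.2.getD i' [] = st.2.2.getD i' [])) ∧
    (∀ j, j < n → ((((List.range m).foldl (fun st2 j =>
        if pvSel s j then
          if pvAdj adj i j then
            (false, st2.2.1.set i (st2.2.1.getD i 0 + 1), st2.2.2.set i ((st2.2.2.getD i []).set j 1))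
          else st2
        else st2) st).2.2.getD i []).getD j 0 =
      if j < m ∧ (pvSel s j && pvAdj adj i j) = true then 1 else (st.2.2.getD i []).getD j 0)) ∧
    (((List.range m).foldl (fun st2 j =>
        if pvSel s j then
          if pvAdj adj i j then
            (false, st2.2.1.set i (st2.2.1.getD i 0 + 1), st2.2.2.set i ((st2.2.2.getD i []).set j 1))
          else st2
        else st2) st).1 =
      (st.1 && ((List.range m).countP (fun j => pvSel s j && pvAdj adj i j) == 0))) := by
  intro m
  induction m with
  | zero =>
    intro _ st h1 h2 h3
    refine ⟨h1, h2, h3, by simp, fun _ _ => rfl, fun _ _ => rfl, ?_, by simp⟩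
    intro j _
    simp only [List.range_zero, List.foldl_nil]
    rw [if_neg (by rintro ⟨h', _⟩; omega)]
  | succ m ih =>
    intro hm st h1 h2 h3
    obtain ⟨ih1, ih2, ih3, ih4, ih5, ih6, ih7, ih8⟩ := ih (by omega) st h1 h2 h3
    rw [List.range_succ, List.foldl_append, List.foldl_cons, List.foldl_nil]
    set r := ((List.range m).foldl (fun st2 j =>
        if pvSel s j then
          if pvAdj adj i j then
            (false, st2.2.1.set i (st2.2.1.getD i 0 + 1), st2.2.2.set i ((st2.2.2.getD i []).set j 1))
          else st2
        else st2) st) with hr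
    have hcp : (List.range m ++ [m]).countP (fun j => pvSel s j && pvAdj adj i j) =
        (List.range m).countP (fun j => pvSel s j && pvAdj adj i j) +
        (if (pvSel s m && pvAdj adj i m) = true then 1 else 0) := by
      rw [List.countP_append]
      simp [List.countP_cons]
    by_cases hq : (pvSel s m && pvAdj adj i m) = true
    · have hsm : pvSel s m = true := by
        cases h' : pvSel s m
        · rw [h'] at hq; simp at hq
        · rfl
      have ham : pvAdj adj i m = true := by
        cases h' : pvAdj adj i m
        · rw [h'] at hq; simp at hq
        · rfl
      rw [if_pos hsm, if_pos ham]
      refine ⟨by simp [ih1], by simp [ih2], ?_, ?_, ?_, ?_, ?_, ?_⟩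
      · intro i' hi'
        by_cases he : i' = i
        · subst he
          rw [pvGetD_set_self _ _ _ _ (by omega), List.length_set]
          exact ih3 i' hi'
        · rw [pvGetD_set_other _ i i' _ _ (fun h' => he h'.symm)]
          exact ih3 i' hi'
      · rw [pvGetD_set_self _ _ _ _ (by omega), ih4, hcp, if_pos hq]
        push_cast
        ring
      · intro i' hne
        rw [pvGetD_set_other _ i i' _ _ (fun h' => hne h'.symm)]
        exact ih5 i' hne
      · intro i' hne
        rw [pvGetD_set_other _ i i' _ _ (fun h' => hne h'.symm)]
        exact ih6 i' hne
      · intro j hj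
        rw [pvGetD_set_self _ _ _ _ (by omega)]
        by_cases hjm : j = m
        · subst hjm
          rw [pvGetD_set_self _ _ _ _ (by rw [ih3 i hi]; omega), if_pos ⟨by omega, hq⟩]
        · rw [pvGetD_set_other _ m j _ _ (fun h' => hjm h'.symm), ih7 j hj,
            if_congr (show (j < m ∧ (pvSel s j && pvAdj adj i j) = true) ↔
                (j < m + 1 ∧ (pvSel s j && pvAdj adj i j) = true) by
              constructor
              · rintro ⟨h', h''⟩; exact ⟨by omega, h''⟩
              · rintro ⟨h', h''⟩; exact ⟨by omega, h''⟩) rfl rfl]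
      · rw [hcp, if_pos hq]
        have : (List.range m).countP (fun j => pvSel s j && pvAdj adj i j) + 1 ≠ 0 := by omega
        simp [this]
    · have hstep : (if pvSel s m = true then
          if pvAdj adj i m = true then
            (false, r.2.1.set i (r.2.1.getD i 0 + 1), r.2.2.set i ((r.2.2.getD i []).set m 1))
          else r
        else r) = r := by
        cases h' : pvSel s m
        · rw [if_neg (by simp)]
        · cases h'' : pvAdj adj i m
          · rw [if_pos rfl, if_neg (by simp)]
          · exfalso; apply hq; rw [h', h'']; rfl
      rw [hstep]
      have hcp' : (List.range m ++ [m]).countP (fun j => pvSel s j && pvAdj adj i j) =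
          (List.range m).countP (fun j => pvSel s j && pvAdj adj i j) := by
        rw [hcp, if_neg hq]
        omega
      refine ⟨ih1, ih2, ih3, by rw [ih4, hcp'], ih5, ih6, ?_, by rw [ih8, hcp']⟩
      intro j hj
      rw [ih7 j hj]
      by_cases hjm : j = m
      · subst hjm
        rw [if_neg (by rintro ⟨h', _⟩; omega), if_neg (by rintro ⟨_, h''⟩; exact hq h'')]
      · rw [if_congr (show (j < m ∧ (pvSel s j && pvAdj adj i j) = true) ↔
            (j < m + 1 ∧ (pvSel s j && pvAdj adj i j) = true) by
          constructor
          · rintro ⟨h', h''⟩; exact ⟨by omega, h''⟩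
          · rintro ⟨h', h''⟩; exact ⟨by omega, h''⟩) rfl rfl]

-- characterization of A's full initialization double loop, over the processed prefix
theorem pvInitOuter_aux (adj : List (List Int)) (n : Nat) (s : List Int) :
    ∀ (k : Nat), k ≤ n →
    (((List.range k).foldl (fun st i =>
        if pvSel s i then
          (List.range n).foldl (fun st2 j =>
            if pvSel s j then
              if pvAdj adj i j then
                (false, st2.2.1.set i (st2.2.1.getD i 0 + 1), st2.2.2.set i ((st2.2.2.getD i []).set j 1))
              else st2
            else st2) st
        else st) (true, List.replicate n (0 : Int), List.replicate n (List.replicate n (0 : Int)))).2.1.length = n) ∧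
    (((List.range k).foldl (fun st i =>
        if pvSel s i then
          (List.range n).foldl (fun st2 j =>
            if pvSel s j then
              if pvAdj adj i j then
                (false, st2.2.1.set i (st2.2.1.getD i 0 + 1), st2.2.2.set i ((st2.2.2.getD i []).set j 1))
              else st2
            else st2) st
        else st) (true, List.replicate n (0 : Int), List.replicate n (List.replicate n (0 : Int)))).2.2.length = n) ∧
    (∀ i, i < n → ((((List.range k).foldl (fun st i =>
        if pvSel s i then
          (List.range n).foldl (fun st2 j =>
            if pvSel s j then
              if pvAdj adj i j then
                (false, st2.2.1.set i (st2.2.1.getD i 0 + 1), st2.2.2.set i ((st2.2.2.getD i []).set j 1))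
              else st2
            else st2) st
        else st) (true, List.replicate n (0 : Int), List.replicate n (List.replicate n (0 : Int)))).2.2.getD i []).length = n)) ∧
    (∀ i, i < n → (((List.range k).foldl (fun st i =>
        if pvSel s i then
          (List.range n).foldl (fun st2 j =>
            if pvSel s j then
              if pvAdj adj i j then
                (false, st2.2.1.set i (st2.2.1.getD i 0 + 1), st2.2.2.set i ((st2.2.2.getD i []).set j 1))
              else st2
            else st2) st
        else st) (true, List.replicate n (0 : Int), List.replicate n (List.replicate n (0 : Int)))).2.1.getD i 0 =
      (if i < k ∧ pvSel s i = true then pvDeg adj n s i else 0))) ∧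
    (∀ i j, i < n → j < n → ((((List.range k).foldl (fun st i =>
        if pvSel s i then
          (List.range n).foldl (fun st2 j =>
            if pvSel s j then
              if pvAdj adj i j then
                (false, st2.2.1.set i (st2.2.1.getD i 0 + 1), st2.2.2.set i ((st2.2.2.getD i []).set j 1))
              else st2
            else st2) st
        else st) (true, List.replicate n (0 : Int), List.replicate n (List.replicate n (0 : Int)))).2.2.getD i []).getD j 0 =
      (if i < k ∧ (pvSel s i && pvSel s j && pvAdj adj i j) = true then 1 else 0))) ∧
    ((((List.range k).foldl (fun st i =>
        if pvSel s i then
          (List.range n).foldl (fun st2 j =>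
            if pvSel s j then
              if pvAdj adj i j then
                (false, st2.2.1.set i (st2.2.1.getD i 0 + 1), st2.2.2.set i ((st2.2.2.getD i []).set j 1))
              else st2
            else st2) st
        else st) (true, List.replicate n (0 : Int), List.replicate n (List.replicate n (0 : Int)))).1 = true) ↔
      (∀ i, i < k → pvSel s i = true → pvDeg adj n s i ≤ 0)) := by
  intro k
  induction k with
  | zero =>
    intro _
    refine ⟨by simp, by simp, ?_, ?_, ?_, by simp⟩
    · intro i hi
      simp [List.getD_replicate, hi]
    · intro i hi
      rw [if_neg (by rintro ⟨h', _⟩; omega)]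
      simp [List.getD_replicate, hi]
    · intro i j hi hj
      rw [if_neg (by rintro ⟨h', _⟩; omega)]
      simp [List.getD_replicate, hi, hj]
  | succ k ihk =>
    intro hk
    obtain ⟨ih1, ih2, ih3, ih4, ih5, ih6⟩ := ihk (by omega)
    rw [List.range_succ, List.foldl_append, List.foldl_cons, List.foldl_nil]
    set r := ((List.range k).foldl (fun st i =>
        if pvSel s i then
          (List.range n).foldl (fun st2 j =>
            if pvSel s j then
              if pvAdj adj i j then
                (false, st2.2.1.set i (st2.2.1.getD i 0 + 1), st2.2.2.set i ((st2.2.2.getD i []).set j 1))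
              else st2
            else st2) st
        else st) (true, List.replicate n (0 : Int), List.replicate n (List.replicate n (0 : Int)))) with hr
    have hkn : k < n := by omega
    cases hsk : pvSel s k with
    | false =>
      rw [if_neg (by simp)]
      refine ⟨ih1, ih2, ih3, ?_, ?_, ?_⟩
      · intro i hi
        rw [ih4 i hi]
        by_cases he : i = k
        · subst he
          rw [if_neg (by rintro ⟨h', _⟩; omega),
            if_neg (by rintro ⟨_, h''⟩; rw [hsk] at h''; exact Bool.false_ne_true h'')]
        · rw [if_congr (show (i < k ∧ pvSel s i = true) ↔ (i < k + 1 ∧ pvSel s i = true) by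
            constructor
            · rintro ⟨h', h''⟩; exact ⟨by omega, h''⟩
            · rintro ⟨h', h''⟩; exact ⟨by omega, h''⟩) rfl rfl]
      · intro i j hi hj
        rw [ih5 i j hi hj]
        by_cases he : i = k
        · subst he
          rw [if_neg (by rintro ⟨h', _⟩; omega),
            if_neg (by rintro ⟨_, h''⟩; rw [hsk] at h''; simp at h'')]
        · rw [if_congr (show (i < k ∧ (pvSel s i && pvSel s j && pvAdj adj i j) = true) ↔
              (i < k + 1 ∧ (pvSel s i && pvSel s j && pvAdj adj i j) = true) by
            constructor
            · rintro ⟨h', h''⟩; exact ⟨by omega, h''⟩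
            · rintro ⟨h', h''⟩; exact ⟨by omega, h''⟩) rfl rfl]
      · rw [ih6]
        constructor
        · intro h' i hi hsel
          rcases Nat.lt_or_ge i k with h'' | h''
          · exact h' i h'' hsel
          · have : i = k := by omega
            subst this
            rw [hsk] at hsel
            exact absurd hsel (by simp)
        · intro h' i hi hsel
          exact h' i (by omega) hsel
    | true =>
      rw [if_pos rfl]
      obtain ⟨a1, a2, a3, a4, a5, a6, a7, a8⟩ :=
        pvInitInner_aux adj n s k hkn n (le_refl n) r ih1 ih2 ih3
      refine ⟨a1, a2, a3, ?_, ?_, ?_⟩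
      · intro i hi
        by_cases he : i = k
        · subst he
          rw [a4, ih4 i hi,
            if_neg (show ¬(i < i ∧ pvSel s i = true) by rintro ⟨h', _⟩; omega),
            if_pos (show i < i + 1 ∧ pvSel s i = true from ⟨by omega, hsk⟩),
            ← pvDeg_eq_countP]
          ring
        · rw [a5 i he, ih4 i hi,
            if_congr (show (i < k ∧ pvSel s i = true) ↔ (i < k + 1 ∧ pvSel s i = true) by
              constructor
              · rintro ⟨h', h''⟩; exact ⟨by omega, h''⟩
              · rintro ⟨h', h''⟩; exact ⟨by omega, h''⟩) rfl rfl]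
      · intro i j hi hj
        by_cases he : i = k
        · subst he
          rw [a7 j hj, ih5 i j hi hj,
            if_neg (show ¬(i < i ∧ (pvSel s i && pvSel s j && pvAdj adj i j) = true) by
              rintro ⟨h', _⟩; omega),
            if_congr (show (j < n ∧ (pvSel s j && pvAdj adj i j) = true) ↔
                (i < i + 1 ∧ (pvSel s i && pvSel s j && pvAdj adj i j) = true) by
              rw [hsk]
              constructor
              · rintro ⟨h', h''⟩; exact ⟨by omega, by rw [Bool.true_and]; exact h''⟩
              · rintro ⟨h', h''⟩; rw [Bool.true_and] at h''; exact ⟨hj, h''⟩) rfl rfl]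
        · rw [a6 i he, ih5 i j hi hj,
            if_congr (show (i < k ∧ (pvSel s i && pvSel s j && pvAdj adj i j) = true) ↔
                (i < k + 1 ∧ (pvSel s i && pvSel s j && pvAdj adj i j) = true) by
              constructor
              · rintro ⟨h', h''⟩; exact ⟨by omega, h''⟩
              · rintro ⟨h', h''⟩; exact ⟨by omega, h''⟩) rfl rfl]
      · rw [a8, Bool.and_eq_true, ih6, beq_iff_eq]
        have hdegk : pvDeg adj n s k =
            ((List.range n).countP (fun j => pvSel s j && pvAdj adj k j) : Int) :=
          pvDeg_eq_countP adj n s k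
        constructor
        · rintro ⟨h', hcp⟩ i hi hsel
          rcases Nat.lt_or_ge i k with h'' | h''
          · exact h' i h'' hsel
          · have : i = k := by omega
            subst this
            rw [hdegk, hcp]
            simp
        · intro h'
          refine ⟨fun i hi hsel => h' i (by omega) hsel, ?_⟩
          have := h' k (by omega) hsk
          rw [hdegk] at this
          omega

theorem pvInit_spec (adj : List (List Int)) (s : List Int) :
    pvInv adj s.length s (pvInit adj s.length s).2.1 (pvInit adj s.length s).2.2 ∧
    ((pvInit adj s.length s).1 = true →
      ∀ i, i < s.length → (pvInit adj s.length s).2.1.getD i 0 ≤ 0) := by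
  obtain ⟨h1, h2, h3, h4, h5, h6⟩ :=
    pvInitOuter_aux adj s.length s s.length (le_refl _)
  have hc : ∀ i, i < s.length → (pvInit adj s.length s).2.1.getD i 0 =
      (if pvSel s i = true then pvDeg adj s.length s i else 0) := by
    intro i hi
    rw [pvInit, h4 i hi,
      if_congr (show (i < s.length ∧ pvSel s i = true) ↔ (pvSel s i = true) by
        constructor
        · rintro ⟨_, h'⟩; exact h'
        · intro h'; exact ⟨hi, h'⟩) rfl rfl]
  refine ⟨⟨rfl, h1, h2, h3, ?_, ?_⟩, ?_⟩
  · intro i hi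
    constructor
    · intro hsel; rw [hc i hi, if_pos hsel]
    · intro hsel; rw [hc i hi, if_neg (by rw [hsel]; simp)]
  · intro i j hi hj
    rw [pvInit, h5 i j hi hj,
      if_congr (show (i < s.length ∧ (pvSel s i && pvSel s j && pvAdj adj i j) = true) ↔
          ((pvSel s i && pvSel s j && pvAdj adj i j) = true) by
        constructor
        · rintro ⟨_, h'⟩; exact h'
        · intro h'; exact ⟨hi, h'⟩) rfl rfl]
  · intro hvalid i hi
    rw [pvInit] at hvalid
    have hall := h6.mp hvalid
    rw [hc i hi]
    cases hsel : pvSel s i with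
    | true => rw [if_pos rfl]; exact hall i hi hsel
    | false => rw [if_neg (by simp)]

-- A's loop returns the running total as soon as valid is set
theorem pvLoopA_valid (n : Nat) (fuel : Nat) (sol conn : List Int) (inner : List (List Int)) (total : Int) :
    pvLoopA n fuel sol conn inner true total = total := by
  cases fuel with
  | zero => rfl
  | succ f => rw [pvLoopA, if_pos rfl]

-- main loop equivalence
theorem pvLoop_eq (adj : List (List Int)) (n : Nat) :
    ∀ (fuel : Nat) (sol s conn : List Int) (inner : List (List Int)) (valid : Bool) (total : Int),
    pvInv adj n s conn inner →
    (valid = true → ∀ i, i < n → conn.getD i 0 ≤ 0) →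
    pvLoopA n fuel sol conn inner valid total = pvLoopB adj fuel s total := by
  intro fuel
  induction fuel with
  | zero => intro _ _ _ _ _ _ _ _; rfl
  | succ f ihf =>
    intro sol s conn inner valid total hinv hvalid
    have hs : s.length = n := hinv.1
    have hconn := hinv.2.2.2.2.1
    cases valid with
    | true =>
      rw [pvLoopA, if_pos rfl, pvLoopB]
      have hall : ∀ i, i < n → pvSel s i = true → pvDeg adj n s i ≤ 0 := by
        intro i hi hsel
        rw [← (hconn i hi).1 hsel]
        exact hvalid rfl i hi
      rw [hs, pvScanB_id adj n s hall]
      rfl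
    | false =>
      rw [pvLoopA, if_neg (by simp), pvLoopB, hs]
      obtain ⟨he1, he2⟩ := pvScan_eq adj n s conn inner hinv
      by_cases hm1 : (pvScanA n conn).2.1 = -1
      · rw [if_neg (by simp [hm1])]
        have hall := pvScanA_none n conn hm1
        have hscan : pvScanA n conn = (0, -1, true) := pvScanA_id n conn hall
        rw [hscan]
        have hB : (pvScanB adj n s).2 = -1 := by rw [← he2, hm1]
        rw [if_pos (by rw [hB]; rfl)]
        exact pvLoopA_valid n f sol conn inner total
      · obtain ⟨v, hvn, hveq, hvpos⟩ := pvScanA_some n conn hm1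
        rw [if_pos hm1]
        have hB : (pvScanB adj n s).2 = (v : Int) := by rw [← he2, hveq]
        rw [if_neg (by rw [hB]; simp)]
        have htn : (pvScanA n conn).2.1.toNat = v := by rw [hveq]; simp
        have htnB : (pvScanB adj n s).2.toNat = v := by rw [hB]; simp
        have hselv : pvSel s v = true := by
          cases h' : pvSel s v
          · have := (hconn v hvn).2 h'
            omega
          · rfl
        have hvalid2 : (pvScanA n conn).2.2 = true →
            ∀ i, i < n → ((pvRemove n ((pvScanA n conn).2.1.toNat)
              (conn.set ((pvScanA n conn).2.1.toNat) 0) inner).1).getD i 0 ≤ 0 := by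
          intro h'
          exfalso
          have := pvScanA_valid n conn h'
          rw [this] at hm1
          exact hm1 rfl
        rw [htn, htnB]
        exact ihf (sol.set v 0) (s.set v 0)
          (pvRemove n v (conn.set v 0) inner).1
          (pvZeroRow n v (pvRemove n v (conn.set v 0) inner).2)
          (pvScanA n conn).2.2 (total + 1)
          (pvInv_step adj n s conn inner hinv v hvn hselv)
          (by
            intro h'
            exfalso
            have := pvScanA_valid n conn h'
            rw [this] at hm1
            exact hm1 rfl)

-- ===== VERDICT (by name: the statement is the Claim_ definition above) =====
theorem repair_solution_1_spec : Claim_equal_repair_solution_1 := by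
  intro solution adjacency_matrix vertex_weights _hdom _hpre
  unfold Spec_repair_solution_1 repair_solution_1 repair_solution_1_alt
  obtain ⟨hinv, hvalid⟩ := pvInit_spec adjacency_matrix solution
  exact pvLoop_eq adjacency_matrix solution.length (solution.length + 2) solution solution
    (pvInit adjacency_matrix solution.length solution).2.1
    (pvInit adjacency_matrix solution.length solution).2.2
    (pvInit adjacency_matrix solution.length solution).1 0 hinv hvalid
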